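-- pv_equiv track=rewrite | github.com/qeedquan/challenges | codegolf/keep-elements-in-sequence-that-have-a-letter-repeated-at-least-3-times.py | has3
-- ===== SOURCE A (Python) =====
-- def has3(s):
--     m = {}
--     for c in s:
--         if c not in m:
--             m[c] = 0
--         m[c] += 1
--         if m[c] >= 3:
--             return True
--     return False
-- ===== SOURCE B (Python) =====
-- def has3(s):
--     return any(s.count(c) >= 3 for c in set(s))
-- ===== Notes on version B (the rewrite author's own statement) =====
-- stated objective: simpler
-- what changed: Replaces A's incremental dict-tallying loop with early exit by a one-liner: for each distinct character, count its occurrences in the whole string and test any count >= 3.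
import Mathlib
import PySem

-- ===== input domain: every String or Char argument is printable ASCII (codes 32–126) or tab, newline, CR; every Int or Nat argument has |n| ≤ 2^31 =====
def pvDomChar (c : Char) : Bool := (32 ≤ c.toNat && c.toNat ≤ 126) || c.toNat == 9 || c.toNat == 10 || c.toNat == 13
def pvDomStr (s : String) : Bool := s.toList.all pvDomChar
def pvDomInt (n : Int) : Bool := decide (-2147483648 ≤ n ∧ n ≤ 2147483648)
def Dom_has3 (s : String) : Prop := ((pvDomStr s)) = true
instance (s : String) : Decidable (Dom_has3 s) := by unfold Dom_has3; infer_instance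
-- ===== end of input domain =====

-- B replaces A's incremental dict-tallying loop (with early exit) by a per-distinct-character
-- whole-string count test; objective: simpler.


-- ===== PORT A =====
-- loop over the characters, maintaining the dict m; early return when a tally reaches 3
def has3Loop : List Char → PySem.Dict Char Int → Bool
  | [], _ => false
  | c :: rest, m =>
    let m1 := if PySem.Dict.contains m c then m else PySem.Dict.insert m c 0   -- if c not in m: m[c] = 0
    let m2 := PySem.Dict.modify m1 c 0 (· + 1)                                 -- m[c] += 1
    if 3 ≤ PySem.Dict.getD m2 c 0 then true else has3Loop rest m2

def has3 (s : String) : Bool := has3Loop s.toList PySem.Dict.empty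

-- ===== PORT B =====
-- any(s.count(c) >= 3 for c in set(s)); s.count(c) for a 1-character c is exactly the char count
def has3_alt (s : String) : Bool :=
  (PySem.Set.ofList s.toList).any (fun c => 3 ≤ s.toList.count c)

-- ===== PRECONDITION & SPEC =====
def Spec_has3 (s : String) (out : Bool) : Prop := out = has3_alt s
instance (s : String) (out : Bool) : Decidable (Spec_has3 s out) := by unfold Spec_has3; infer_instance

-- ===== CLAIM (what is proved, stated in full; the proofs are below) =====
def Claim_equal_has3 : Prop := ∀ (s : String), Dom_has3 s → Spec_has3 s (has3 s)

-- ===== LEMMAS AND PROOFS =====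

lemma has3Loop_iff (l : List Char) : ∀ m : PySem.Dict Char Int,
    has3Loop l m = true ↔ ∃ c ∈ l, 3 ≤ PySem.Dict.getD m c 0 + (l.count c : Int) := by
  induction l with
  | nil => intro m; simp [has3Loop]
  | cons a rest ih =>
    intro m
    have hm1 : ∀ c', PySem.Dict.getD
        (if PySem.Dict.contains m a then m else PySem.Dict.insert m a 0) c' 0
        = PySem.Dict.getD m c' 0 := by
      intro c'
      by_cases h : PySem.Dict.contains m a = true
      · simp [h]
      · rw [if_neg h]
        by_cases hc : c' = a
        · subst hc
          rw [PySem.Dict.getD_insert_self]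
          have h0 : m.get? c' = none :=
            (PySem.Dict.get?_eq_none_iff_contains m c').mpr (by simpa using h)
          simp [PySem.Dict.getD, h0]
        · exact PySem.Dict.getD_insert_of_ne m 0 0 hc
    have hm2 : ∀ c', PySem.Dict.getD
        (PySem.Dict.modify (if PySem.Dict.contains m a then m else PySem.Dict.insert m a 0) a 0 (· + 1)) c' 0
        = if c' = a then PySem.Dict.getD m a 0 + 1 else PySem.Dict.getD m c' 0 := by
      intro c'
      rw [PySem.Dict.getD_modify]
      by_cases hc : c' = a <;> simp [hc, hm1]
    simp only [has3Loop]
    by_cases h3 : 3 ≤ PySem.Dict.getD m a 0 + 1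
    · have hyes : (3 : Int) ≤ PySem.Dict.getD
          (PySem.Dict.modify (if PySem.Dict.contains m a then m else PySem.Dict.insert m a 0) a 0 (· + 1)) a 0 := by
        rw [hm2]; simpa using h3
      rw [if_pos hyes]
      simp only [true_iff]
      refine ⟨a, List.mem_cons_self, ?_⟩
      have hc : 1 ≤ ((a :: rest).count a : Int) := by
        have := List.count_cons_self (a := a) (l := rest); omega
      omega
    · have hne : ¬ (3 : Int) ≤ PySem.Dict.getD
          (PySem.Dict.modify (if PySem.Dict.contains m a then m else PySem.Dict.insert m a 0) a 0 (· + 1)) a 0 := by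
        rw [hm2]; simpa using h3
      rw [if_neg hne]
      rw [ih]
      constructor
      · rintro ⟨c, hc, hge⟩
        rw [hm2] at hge
        by_cases hca : c = a
        · subst hca
          refine ⟨c, List.mem_cons_self, ?_⟩
          rw [if_pos rfl] at hge
          have := List.count_cons_self (a := c) (l := rest)
          omega
        · refine ⟨c, List.mem_cons_of_mem _ hc, ?_⟩
          rw [if_neg hca] at hge
          rw [List.count_cons_of_ne (Ne.symm hca)]
          exact hge
      · rintro ⟨c, hc, hge⟩
        by_cases hca : c = a
        · subst hca
          have hcount := List.count_cons_self (a := c) (l := rest)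
          have hcr : c ∈ rest := by
            by_contra hno
            have : rest.count c = 0 := List.count_eq_zero.mpr hno
            omega
          refine ⟨c, hcr, ?_⟩
          rw [hm2, if_pos rfl]; omega
        · have hcr : c ∈ rest := by
            rcases List.mem_cons.mp hc with h | h
            · exact absurd h hca
            · exact h
          refine ⟨c, hcr, ?_⟩
          rw [hm2, if_neg hca]
          rw [List.count_cons_of_ne (Ne.symm hca)] at hge
          exact hge

lemma getD_empty (c : Char) : PySem.Dict.getD (PySem.Dict.empty : PySem.Dict Char Int) c 0 = 0 := by
  rfl

-- ===== VERDICT (by name: the statement is the Claim_ definition above) =====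
theorem has3_spec : Claim_equal_has3 := by
  intro s _
  unfold Spec_has3
  rw [Bool.eq_iff_iff]
  rw [has3, has3Loop_iff]
  unfold has3_alt
  simp only [List.any_eq_true, PySem.Set.mem_ofList, decide_eq_true_eq, getD_empty, zero_add]
  constructor
  · rintro ⟨c, hc, hge⟩; exact ⟨c, hc, by exact_mod_cast hge⟩
  · rintro ⟨c, hc, hge⟩; exact ⟨c, hc, by exact_mod_cast hge⟩
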